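-- pv_equiv track=rewrite | github.com/jacob-underwood/Kaprekarious | Kaprekar.py | one_different
-- ===== SOURCE A (Python) =====
-- def one_different(num: str, length: int = 3) -> bool:
--     if len(num) == length:
--         return True
--     for digit1 in list(num):
--         for digit2 in list(num):
--             if not digit1 == digit2:
--                 return True
--     return False
-- ===== SOURCE B (Python) =====
-- def one_different(num: str, length: int = 3) -> bool:
--     return len(num) == length or len(set(num)) > 1
-- ===== Notes on version B (the rewrite author's own statement) =====
-- stated objective: faster
-- what changed: Replaces A's nested all-pairs character comparison with a one-liner that builds the set of distinct characters once and checks whether it has more than one element.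
import Mathlib
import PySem

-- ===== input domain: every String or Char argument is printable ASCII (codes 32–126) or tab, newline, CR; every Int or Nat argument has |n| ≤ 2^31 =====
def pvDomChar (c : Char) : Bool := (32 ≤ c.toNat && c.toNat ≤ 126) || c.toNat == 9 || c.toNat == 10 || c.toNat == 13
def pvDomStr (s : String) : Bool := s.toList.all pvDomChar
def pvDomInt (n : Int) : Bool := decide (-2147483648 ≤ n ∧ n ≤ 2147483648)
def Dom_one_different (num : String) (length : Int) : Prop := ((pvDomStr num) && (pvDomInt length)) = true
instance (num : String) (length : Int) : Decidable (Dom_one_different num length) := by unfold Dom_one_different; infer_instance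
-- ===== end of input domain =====

-- B builds the set of distinct characters once and tests |set(num)| > 1, replacing A's nested all-pairs scan (faster).

-- ===== PORT A =====
-- if len(num)==length: return True; nested for digit1/digit2 over list(num): if digit1 != digit2 return True; return False
def one_different (num : String) (length : Int) : Bool :=
  if (PySem.Str.len num) = length then true
  else num.toList.any (fun digit1 => num.toList.any (fun digit2 => !(digit1 == digit2)))

-- ===== PORT B =====
-- return len(num) == length or len(set(num)) > 1
def one_different_alt (num : String) (length : Int) : Bool :=
  decide ((PySem.Str.len num) = length) || decide (1 < PySem.Set.len (PySem.Set.ofList num.toList))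

-- ===== PRECONDITION & SPEC =====
def Spec_one_different (num : String) (length : Int) (out : Bool) : Prop := out = one_different_alt num length
instance (num : String) (length : Int) (out : Bool) : Decidable (Spec_one_different num length out) := by unfold Spec_one_different; infer_instance

-- ===== CLAIM (what is proved, stated in full; the proofs are below) =====
def Claim_equal_one_different : Prop := ∀ (num : String) (length : Int), Dom_one_different num length → Spec_one_different num length (one_different num length)

-- ===== LEMMAS AND PROOFS =====
-- a nodup list has length ≤ 1 iff all its elements are equal
lemma nodup_length_le_one {α : Type} (s : List α) (h : s.Nodup) :
    s.length ≤ 1 ↔ ∀ x ∈ s, ∀ y ∈ s, x = y := by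
  cases s with
  | nil => simp
  | cons a t =>
    cases t with
    | nil => simp
    | cons b u =>
      simp only [List.length_cons]
      constructor
      · omega
      · intro hall
        exact absurd (hall a (by simp) b (by simp)) (by
          simp only [List.nodup_cons, List.mem_cons] at h
          exact fun hab => h.1 (Or.inl hab))

-- "some pair of characters differs" = "the distinct-character set has more than one element"
lemma any_pair_ne_eq_card (l : List Char) :
    (l.any (fun a => l.any (fun b => !(a == b)))) =
    decide (1 < PySem.Set.len (PySem.Set.ofList l)) := by
  apply Bool.eq_iff_iff.mpr
  simp only [List.any_eq_true, Bool.not_eq_eq_eq_not, Bool.not_true, beq_eq_false_iff_ne, ne_eq,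
    decide_eq_true_eq, PySem.Set.len]
  rw [show ((1 : Int) < ((PySem.Set.ofList l).length : Int)) ↔ 1 < (PySem.Set.ofList l).length by
    exact_mod_cast Iff.rfl]
  constructor
  · rintro ⟨a, ha, b, hb, hab⟩
    by_contra hle
    push_neg at hle
    have h1 : (PySem.Set.ofList l).length ≤ 1 := by omega
    exact hab ((nodup_length_le_one _ (PySem.Set.nodup_ofList l)).mp h1 a
      ((PySem.Set.mem_ofList l a).mpr ha) b ((PySem.Set.mem_ofList l b).mpr hb))
  · intro hlt
    by_contra hno
    push_neg at hno
    have h1 : (PySem.Set.ofList l).length ≤ 1 :=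
      (nodup_length_le_one _ (PySem.Set.nodup_ofList l)).mpr
        (fun x hx y hy => hno x ((PySem.Set.mem_ofList l x).mp hx) y ((PySem.Set.mem_ofList l y).mp hy))
    omega

-- ===== VERDICT (by name: the statement is the Claim_ definition above) =====
theorem one_different_spec : Claim_equal_one_different := by
  intro num length _
  unfold Spec_one_different one_different one_different_alt
  rw [any_pair_ne_eq_card num.toList]
  by_cases h : (PySem.Str.len num) = length
  · simp [h]
  · simp [h]
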